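-- pv_equiv track=rewrite | github.com/hisakakoji2/memory-benchmark | scripts/generate_tasks_from_events.py | group_by_repo
-- ===== SOURCE A (Python) =====
-- def group_by_repo(rows):
--     grouped = {}
--     for row in rows:
--         repo = row.get("repo", "unknown")
--         grouped.setdefault(repo, []).append(row)
--     for repo in grouped:
--         grouped[repo] = sorted(grouped[repo], key=lambda x: x.get("timestamp", ""))
--     return grouped
-- ===== SOURCE B (Python) =====
-- def group_by_repo(rows):
--     grouped = {row.get("repo", "unknown"): [] for row in rows}
--     for row in sorted(rows, key=lambda x: x.get("timestamp", "")):
--         grouped[row.get("repo", "unknown")].append(row)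
--     return grouped
-- ===== Notes on version B (the rewrite author's own statement) =====
-- stated objective: alternative
-- what changed: B replaces A's group-then-sort-each-bucket with one stable global sort by timestamp followed by a single grouping pass (keys pre-seeded in first-occurrence order so the dict's key order matches A's exactly).
import Mathlib
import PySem

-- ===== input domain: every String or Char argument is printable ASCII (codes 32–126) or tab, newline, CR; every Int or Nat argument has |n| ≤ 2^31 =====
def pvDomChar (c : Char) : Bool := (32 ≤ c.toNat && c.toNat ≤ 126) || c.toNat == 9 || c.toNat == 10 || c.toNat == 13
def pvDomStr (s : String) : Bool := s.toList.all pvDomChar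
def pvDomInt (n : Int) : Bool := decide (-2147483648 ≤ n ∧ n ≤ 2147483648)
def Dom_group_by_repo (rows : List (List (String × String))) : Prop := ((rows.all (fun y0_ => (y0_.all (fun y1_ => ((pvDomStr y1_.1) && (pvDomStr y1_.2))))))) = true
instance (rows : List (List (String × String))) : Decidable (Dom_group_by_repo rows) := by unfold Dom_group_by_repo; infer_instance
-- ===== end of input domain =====

-- B replaces A's per-group sorts by ONE stable global sort by timestamp followed by a grouping pass
-- (keys pre-seeded in first-occurrence order so the returned dict's key order matches A's exactly).

-- row.get(k, dflt) on a Python dict row (association list)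
def pvRowGet (row : List (String × String)) (k dflt : String) : String :=
  (PySem.Dict.mk row).getD k dflt

-- ===== PORT A =====
def group_by_repo (rows : List (List (String × String))) : List (String × List (List (String × String))) :=
  -- grouped = {}; for row in rows: grouped.setdefault(row.get("repo","unknown"), []).append(row)
  let grouped := rows.foldl
    (fun d row => d.modify (pvRowGet row "repo" "unknown") [] (fun v => v ++ [row]))
    PySem.Dict.empty
  -- for repo in grouped: grouped[repo] = sorted(grouped[repo], key=lambda x: x.get("timestamp",""))
  let grouped2 := grouped.keys.foldl
    (fun d repo => d.insert repo (PySem.List.sorted (d.getD repo []) (fun x => pvRowGet x "timestamp" "")))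
    grouped
  grouped2.items

-- ===== PORT B =====
def group_by_repo_alt (rows : List (List (String × String))) : List (String × List (List (String × String))) :=
  -- grouped = {row.get("repo","unknown"): [] for row in rows}
  let grouped := rows.foldl
    (fun d row => d.insert (pvRowGet row "repo" "unknown") ([] : List (List (String × String))))
    PySem.Dict.empty
  -- for row in sorted(rows, key=lambda x: x.get("timestamp","")): grouped[key].append(row)
  -- (the key is always present, so grouped[key] never raises; modify with default [] is exact here)
  let grouped2 := (PySem.List.sorted rows (fun x => pvRowGet x "timestamp" "")).foldl
    (fun d row => d.modify (pvRowGet row "repo" "unknown") [] (fun v => v ++ [row]))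
    grouped
  grouped2.items

-- ===== PRECONDITION & SPEC =====
def Spec_group_by_repo (rows : List (List (String × String))) (out : List (String × List (List (String × String)))) : Prop := out = group_by_repo_alt rows
instance (rows : List (List (String × String))) (out : List (String × List (List (String × String)))) : Decidable (Spec_group_by_repo rows out) := by unfold Spec_group_by_repo; infer_instance

-- ===== CLAIM (what is proved, stated in full; the proofs are below) =====
def Claim_equal_group_by_repo : Prop := ∀ (rows : List (List (String × String))), Dom_group_by_repo rows → Spec_group_by_repo rows (group_by_repo rows)

-- ===== LEMMAS AND PROOFS =====

-- inserting in front when x goes before every element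
theorem insertBy_of_forall_before {α : Type} (before : α → α → Bool) (x : α) (ys : List α)
    (h : ∀ z ∈ ys, before x z = true) :
    PySem.List.insertBy before x ys = x :: ys := by
  cases ys with
  | nil => rfl
  | cons y t => simp [PySem.List.insertBy, h y (by simp)]

-- insertBy cons equations
theorem insertBy_cons_pos {α : Type} (before : α → α → Bool) (x y : α) (t : List α)
    (h : before x y = true) :
    PySem.List.insertBy before x (y :: t) = x :: y :: t := by
  simp [PySem.List.insertBy, h]

theorem insertBy_cons_neg {α : Type} (before : α → α → Bool) (x y : α) (t : List α)
    (h : before x y = false) :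
    PySem.List.insertBy before x (y :: t) = y :: PySem.List.insertBy before x t := by
  simp [PySem.List.insertBy, h]

-- filter commutes with one stable insertion into a key-sorted list
theorem filter_insertBy {α κ : Type} [LinearOrder κ] (key : α → κ) (p : α → Bool) (x : α) :
    ∀ ys : List α, ys.Pairwise (fun a b => key a ≤ key b) →
    (PySem.List.insertBy (fun a b => decide (key a < key b)) x ys).filter p =
      if p x then PySem.List.insertBy (fun a b => decide (key a < key b)) x (ys.filter p)
      else ys.filter p := by
  intro ys
  induction ys with
  | nil => intro _; by_cases hx : p x <;> simp [PySem.List.insertBy, hx]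
  | cons y t ih =>
    intro hp
    have hyt : ∀ z ∈ t, key y ≤ key z := fun z hz => (List.pairwise_cons.mp hp).1 z hz
    have hpt : t.Pairwise (fun a b => key a ≤ key b) := (List.pairwise_cons.mp hp).2
    by_cases hxy : key x < key y
    · rw [insertBy_cons_pos _ _ _ _ (by simp [hxy])]
      by_cases hx : p x
      · rw [List.filter_cons_of_pos hx, if_pos hx]
        by_cases hy : p y
        · rw [List.filter_cons_of_pos hy, insertBy_cons_pos _ _ _ _ (by simp [hxy])]
        · have hfront : ∀ z ∈ t.filter p, (fun a b => decide (key a < key b)) x z = true := by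
            intro z hz
            have := hyt z (List.mem_of_mem_filter hz)
            simp [lt_of_lt_of_le hxy this]
          rw [List.filter_cons_of_neg hy,
            insertBy_of_forall_before (fun a b => decide (key a < key b)) x (t.filter p) hfront]
      · rw [List.filter_cons_of_neg hx, if_neg hx]
    · rw [insertBy_cons_neg _ _ _ _ (by simp [hxy])]
      by_cases hy : p y
      · rw [List.filter_cons_of_pos hy, List.filter_cons_of_pos hy, ih hpt]
        by_cases hx : p x
        · rw [if_pos hx, if_pos hx, insertBy_cons_neg _ _ _ _ (by simp [hxy])]
        · rw [if_neg hx, if_neg hx]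
      · rw [List.filter_cons_of_neg hy, List.filter_cons_of_neg hy]
        exact ih hpt

-- filter commutes with the stable sort
theorem filter_sorted {α κ : Type} [LinearOrder κ] (key : α → κ) (p : α → Bool) (xs : List α) :
    (PySem.List.sorted xs key).filter p = PySem.List.sorted (xs.filter p) key := by
  induction xs using List.reverseRecOn with
  | nil => rfl
  | append_singleton xs x ih =>
    have hsnoc : ∀ ys : List α, PySem.List.sorted (ys ++ [x]) key =
        PySem.List.insertBy (fun a b => decide (key a < key b)) x (PySem.List.sorted ys key) := by
      intro ys
      rw [PySem.List.sorted_eq_foldl_insertBy, PySem.List.sorted_eq_foldl_insertBy, List.foldl_append]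
      rfl
    rw [hsnoc, filter_insertBy key p x _ (PySem.List.sorted_pairwise xs key), List.filter_append]
    by_cases hx : p x
    · rw [if_pos hx, ih, List.filter_cons, if_pos hx, List.filter_nil, hsnoc]
    · rw [if_neg hx, ih, List.filter_cons, if_neg hx, List.filter_nil, List.append_nil]

-- getD is untouched by an insert loop over keys not containing c
theorem getD_foldl_insert_not_mem {κ ν : Type} [BEq κ] [LawfulBEq κ] [DecidableEq κ]
    (g : PySem.Dict κ ν → κ → ν) (dflt : ν) (c : κ) :
    ∀ (l : List κ) (d : PySem.Dict κ ν), c ∉ l →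
      (l.foldl (fun d k => d.insert k (g d k)) d).getD c dflt = d.getD c dflt := by
  intro l
  induction l with
  | nil => intro d _; rfl
  | cons k t ih =>
    intro d hc
    have hck : c ≠ k := fun h => hc (h ▸ List.mem_cons_self)
    rw [List.foldl_cons, ih _ (fun h => hc (List.mem_cons_of_mem _ h)),
      PySem.Dict.getD_insert, if_neg hck]

-- the value-rewriting loop of A: each key's value becomes g of its old value
theorem getD_foldl_insert_self {κ ν : Type} [BEq κ] [LawfulBEq κ] [DecidableEq κ]
    (g : ν → ν) (dflt : ν) (c : κ) :
    ∀ (l : List κ) (d : PySem.Dict κ ν), l.Nodup → c ∈ l →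
      (l.foldl (fun d k => d.insert k (g (d.getD k dflt))) d).getD c dflt = g (d.getD c dflt) := by
  intro l
  induction l with
  | nil => intro d _ hc; cases hc
  | cons k t ih =>
    intro d hnd hc
    rw [List.foldl_cons]
    rcases List.mem_cons.mp hc with hck | hct
    · subst hck
      rw [getD_foldl_insert_not_mem (fun d k => g (d.getD k dflt)) dflt c t _
          (List.nodup_cons.mp hnd).1,
        PySem.Dict.getD_insert, if_pos rfl]
    · have hck : c ≠ k := fun h => (List.nodup_cons.mp hnd).1 (h ▸ hct)
      rw [ih _ (List.nodup_cons.mp hnd).2 hct, PySem.Dict.getD_insert, if_neg hck]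

-- the seeding loop of B: every value is []
theorem getD_foldl_insert_nil {κ ν : Type} [BEq κ] [LawfulBEq κ] [DecidableEq κ]
    {β : Type} (k : β → κ) (e : ν) (c : κ) :
    ∀ (l : List β) (d : PySem.Dict κ ν), d.getD c e = e →
      (l.foldl (fun d r => d.insert (k r) e) d).getD c e = e := by
  intro l
  induction l with
  | nil => intro d h; exact h
  | cons r t ih =>
    intro d h
    rw [List.foldl_cons]
    exact ih _ (by rw [PySem.Dict.getD_insert]; split <;> simp [h])

-- Set.update by elements already present is the identity
theorem set_update_of_subset {α : Type} [BEq α] [LawfulBEq α]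
    (s : PySem.Set α) (xs : List α) (h : ∀ y ∈ xs, y ∈ s) :
    PySem.Set.update s xs = s := by
  rw [PySem.Set.update_eq_append_filter]
  have hnil : (PySem.Set.ofList xs).filter (fun y => !(PySem.Set.contains s y)) = [] := by
    rw [List.filter_eq_nil_iff]
    intro y hy
    have hys := (PySem.Set.contains_iff s y).mpr (h y ((PySem.Set.mem_ofList xs y).mp hy))
    simp only [hys, Bool.not_true, Bool.false_eq_true, not_false_eq_true]
  rw [hnil, List.append_nil]

-- the grouping fold (over any list l) reaches getD = old value ++ rows of that repo, in order
theorem getD_group_fold (l : List (List (String × String)))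
    (d : PySem.Dict String (List (List (String × String)))) (c : String) :
    (l.foldl (fun d row => d.modify (pvRowGet row "repo" "unknown") [] (fun v => v ++ [row])) d).getD c []
      = d.getD c [] ++ l.filter (fun r => pvRowGet r "repo" "unknown" == c) := by
  have h := PySem.Dict.getD_foldl_modify_append
    (l.map (fun r => (pvRowGet r "repo" "unknown", r))) d c
  rw [List.foldl_map] at h
  simpa [Function.comp_def, List.filter_map] using h

-- and its key set
theorem keys_group_fold (l : List (List (String × String)))
    (d : PySem.Dict String (List (List (String × String)))) :
    (l.foldl (fun d row => d.modify (pvRowGet row "repo" "unknown") [] (fun v => v ++ [row])) d).keys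
      = PySem.Set.update d.keys (l.map (fun r => pvRowGet r "repo" "unknown")) :=
  PySem.Dict.keys_foldl_modify_key l (fun r => pvRowGet r "repo" "unknown") []
    (fun _ row => fun v => v ++ [row]) d

theorem group_by_repo_eq_alt (rows : List (List (String × String))) :
    group_by_repo rows = group_by_repo_alt rows := by
  unfold group_by_repo group_by_repo_alt
  set d1 := rows.foldl (fun d row => d.modify (pvRowGet row "repo" "unknown") [] (fun v => v ++ [row])) PySem.Dict.empty with hd1
  set d2 := d1.keys.foldl (fun d repo => d.insert repo (PySem.List.sorted (d.getD repo []) (fun x => pvRowGet x "timestamp" ""))) d1 with hd2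
  set b0 := rows.foldl (fun d row => d.insert (pvRowGet row "repo" "unknown") ([] : List (List (String × String)))) PySem.Dict.empty with hb0
  set b2 := (PySem.List.sorted rows (fun x => pvRowGet x "timestamp" "")).foldl (fun d row => d.modify (pvRowGet row "repo" "unknown") [] (fun v => v ++ [row])) b0 with hb2
  -- keys of every dictionary = first-occurrence-deduplicated repo names
  have hk1 : d1.keys = PySem.Set.ofList (rows.map (fun r => pvRowGet r "repo" "unknown")) := by
    rw [hd1, keys_group_fold,
      show (PySem.Dict.empty : PySem.Dict String (List (List (String × String)))).keys = [] from rfl]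
    exact PySem.Set.update_nil_left _
  have hk1nd : d1.keys.Nodup := by rw [hk1]; exact PySem.Set.nodup_ofList _
  have hk2 : d2.keys = d1.keys := by
    rw [hd2, PySem.Dict.keys_foldl_insert_key d1.keys (fun k => k)
      (fun d repo => PySem.List.sorted (d.getD repo []) (fun x => pvRowGet x "timestamp" "")) d1]
    rw [show List.map (fun k => k) d1.keys = d1.keys from by simp]
    exact set_update_of_subset _ _ (fun y hy => hy)
  have hkb0 : b0.keys = PySem.Set.ofList (rows.map (fun r => pvRowGet r "repo" "unknown")) := by
    rw [hb0, PySem.Dict.keys_foldl_insert_key rows (fun r => pvRowGet r "repo" "unknown")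
      (fun _ _ => ([] : List (List (String × String)))) PySem.Dict.empty,
      show (PySem.Dict.empty : PySem.Dict String (List (List (String × String)))).keys = [] from rfl]
    exact PySem.Set.update_nil_left _
  have hkb2 : b2.keys = PySem.Set.ofList (rows.map (fun r => pvRowGet r "repo" "unknown")) := by
    rw [hb2, keys_group_fold, hkb0]
    refine set_update_of_subset _ _ ?_
    intro y hy
    rcases List.mem_map.mp hy with ⟨r, hr, rfl⟩
    exact (PySem.Set.mem_ofList _ _).mpr
      (List.mem_map.mpr ⟨r, (PySem.List.mem_sorted _ _ _ _).mp hr, rfl⟩)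
  have hkb2nd : b2.keys.Nodup := by rw [hkb2]; exact PySem.Set.nodup_ofList _
  have hk2' : d2.keys = b2.keys := by rw [hk2, hk1, hkb2]
  -- the values at each live key agree
  have hval : ∀ c ∈ d2.keys, d2.getD c [] = b2.getD c [] := by
    intro c hc
    rw [hk2] at hc
    have hA : d2.getD c [] = PySem.List.sorted
        (rows.filter (fun r => pvRowGet r "repo" "unknown" == c))
        (fun x => pvRowGet x "timestamp" "") := by
      have h := getD_foldl_insert_self
        (fun v => PySem.List.sorted v (fun x => pvRowGet x "timestamp" "")) [] c
        d1.keys d1 hk1nd hc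
      rw [hd2, h, hd1, getD_group_fold]
      simp
    have hB : b2.getD c [] = (PySem.List.sorted rows (fun x => pvRowGet x "timestamp" "")).filter
        (fun r => pvRowGet r "repo" "unknown" == c) := by
      rw [hb2, getD_group_fold,
        getD_foldl_insert_nil (fun r => pvRowGet r "repo" "unknown") _ c rows PySem.Dict.empty rfl]
      simp
    rw [hA, hB, filter_sorted]
  -- items: same key lists, same values
  rw [PySem.Dict.items_eq_map_keys d2 (hk2 ▸ hk1nd) [],
    PySem.Dict.items_eq_map_keys b2 hkb2nd [], ← hk2']
  exact List.map_congr_left (fun c hc => by rw [hval c hc])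

-- ===== VERDICT (by name: the statement is the Claim_ definition above) =====
theorem group_by_repo_spec : Claim_equal_group_by_repo := by
  intro rows _
  unfold Spec_group_by_repo
  exact group_by_repo_eq_alt rows
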